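-- pv_equiv track=rewrite | github.com/tartopum/atelier | server/tank.py | bin_time_series
-- ===== SOURCE A (Python) =====
-- from collections import defaultdict
--
-- def bin_time_series(dates, data, binsize, start_date=None):
--     if not dates:
--         return [], []
--     if start_date is None:
--         start_date = dates[0]
--     binned_data = defaultdict(list)
--     for date, val in zip(dates, data):
--         bin_index = abs(date - start_date) // binsize
--         binned_data[start_date + bin_index * binsize].append(val)
--     binned_dates = sorted(binned_data)
--     return binned_dates, [binned_data[d] for d in binned_dates]
-- ===== SOURCE B (Python) =====
-- def bin_time_series(dates, data, binsize, start_date=None):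
--     if not dates:
--         return [], []
--     if start_date is None:
--         start_date = dates[0]
--     binned_dates = sorted({start_date + (abs(d - start_date) // binsize) * binsize
--                            for d, _ in zip(dates, data)})
--     return binned_dates, [
--         [v for d, v in zip(dates, data)
--          if start_date + (abs(d - start_date) // binsize) * binsize == b]
--         for b in binned_dates
--     ]
-- ===== Notes on version B (the rewrite author's own statement) =====
-- stated objective: alternative
-- what changed: Replaces the defaultdict accumulation with a sorted set comprehension of bin keys plus one filtering pass per bin; no dict is built at all.
import Mathlib
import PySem

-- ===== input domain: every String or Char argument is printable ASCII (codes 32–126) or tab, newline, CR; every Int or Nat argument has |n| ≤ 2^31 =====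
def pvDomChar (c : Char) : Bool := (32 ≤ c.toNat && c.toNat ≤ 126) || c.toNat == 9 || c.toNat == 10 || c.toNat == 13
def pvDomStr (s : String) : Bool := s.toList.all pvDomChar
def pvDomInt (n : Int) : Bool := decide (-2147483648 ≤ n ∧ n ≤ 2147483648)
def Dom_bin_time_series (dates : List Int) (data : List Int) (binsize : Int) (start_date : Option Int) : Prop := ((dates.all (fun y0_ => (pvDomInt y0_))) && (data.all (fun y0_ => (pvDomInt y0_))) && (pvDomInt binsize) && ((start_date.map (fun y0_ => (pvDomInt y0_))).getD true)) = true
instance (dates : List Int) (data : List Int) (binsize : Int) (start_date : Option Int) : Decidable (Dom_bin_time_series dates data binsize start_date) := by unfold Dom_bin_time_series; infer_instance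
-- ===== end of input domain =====

-- B replaces A's defaultdict accumulation by a sorted set comprehension of bin keys
-- plus one filtering pass per bin (alternative decomposition, no dict at all).

-- ===== PORT A =====
def bin_time_series (dates : List Int) (data : List Int) (binsize : Int) (start_date : Option Int) : List Int × List (List Int) :=
  match dates with
  | [] => ([], [])
  | d0 :: rest =>
    let start := start_date.getD d0
    let binned_data : PySem.Dict Int (List Int) :=
      ((d0 :: rest).zip data).foldl
        (fun d p =>
          let bin_index := PySem.Int.floordiv |p.1 - start| binsize
          d.modify (start + bin_index * binsize) [] (fun xs => xs ++ [p.2]))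
        PySem.Dict.empty
    let binned_dates := PySem.List.sorted binned_data.keys (fun k => k)
    (binned_dates, binned_dates.map (fun dkey => binned_data.getD dkey []))

-- ===== PORT B =====
def bin_time_series_alt (dates : List Int) (data : List Int) (binsize : Int) (start_date : Option Int) : List Int × List (List Int) :=
  match dates with
  | [] => ([], [])
  | d0 :: rest =>
    let start := start_date.getD d0
    let binned_dates := PySem.List.sorted
      (PySem.Set.ofList (((d0 :: rest).zip data).map
        (fun p => start + PySem.Int.floordiv |p.1 - start| binsize * binsize)))
      (fun k => k)
    (binned_dates,
     binned_dates.map (fun b =>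
       ((((d0 :: rest).zip data).filter
          (fun p => start + PySem.Int.floordiv |p.1 - start| binsize * binsize == b)).map
         (fun p => p.2))))

-- ===== PRECONDITION & SPEC =====
-- Pre_ excludes only binsize = 0 with nonempty dates and data, where the Python A (and B) raise ZeroDivisionError.
def Pre_bin_time_series (dates : List Int) (data : List Int) (binsize : Int) (start_date : Option Int) : Prop :=
  dates = [] ∨ data = [] ∨ binsize ≠ 0
instance (dates : List Int) (data : List Int) (binsize : Int) (start_date : Option Int) : Decidable (Pre_bin_time_series dates data binsize start_date) := by unfold Pre_bin_time_series; infer_instance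
def pvWitness_bin_time_series : List Int × List Int × Int × Option Int := ([0, 3, 5, 1], [10, 20, 30, 40], 3, none)
def Spec_bin_time_series (dates : List Int) (data : List Int) (binsize : Int) (start_date : Option Int) (out : List Int × List (List Int)) : Prop := out = bin_time_series_alt dates data binsize start_date
instance (dates : List Int) (data : List Int) (binsize : Int) (start_date : Option Int) (out : List Int × List (List Int)) : Decidable (Spec_bin_time_series dates data binsize start_date out) := by unfold Spec_bin_time_series; infer_instance

-- ===== CLAIM (what is proved, stated in full; the proofs are below) =====
def Claim_equal_bin_time_series : Prop := ∀ (dates : List Int) (data : List Int) (binsize : Int) (start_date : Option Int), Dom_bin_time_series dates data binsize start_date → Pre_bin_time_series dates data binsize start_date → Spec_bin_time_series dates data binsize start_date (bin_time_series dates data binsize start_date)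

-- ===== LEMMAS AND PROOFS =====

-- keys of A's accumulation dict = the distinct bin keys in first-occurrence order
theorem binDict_keys (l : List (Int × Int)) (key : Int × Int → Int) :
    ((l.foldl (fun d p => d.modify (key p) [] (fun xs => xs ++ [p.2]))
      (PySem.Dict.empty : PySem.Dict Int (List Int))).keys)
      = PySem.Set.ofList (l.map key) := by
  have h := PySem.Dict.keys_foldl_modify_key l key [] (fun _ p xs => xs ++ [p.2]) (PySem.Dict.empty : PySem.Dict Int (List Int))
  exact h.trans (by rw [PySem.Dict.keys_empty, PySem.Set.update_nil_left])

-- lookup in A's accumulation dict = the filtered values for that bin, in input order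
theorem binDict_getD (l : List (Int × Int)) (key : Int × Int → Int) (k : Int) :
    ((l.foldl (fun d p => d.modify (key p) [] (fun xs => xs ++ [p.2]))
      (PySem.Dict.empty : PySem.Dict Int (List Int))).getD k [])
      = (l.filter (fun p => key p == k)).map (fun p => p.2) := by
  have h0 : (l.foldl (fun d p => d.modify (key p) [] (fun xs => xs ++ [p.2]))
      (PySem.Dict.empty : PySem.Dict Int (List Int)))
      = ((l.map (fun p => (key p, p.2))).foldl
          (fun d q => d.modify q.1 [] (fun xs => xs ++ [q.2]))
          (PySem.Dict.empty : PySem.Dict Int (List Int))) :=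
    (List.foldl_map (f := fun p : Int × Int => (key p, p.2))
      (g := fun (d : PySem.Dict Int (List Int)) (q : Int × Int) => d.modify q.1 [] (fun xs => xs ++ [q.2]))
      (l := l) (init := PySem.Dict.empty)).symm
  rw [h0]
  have h := PySem.Dict.getD_foldl_modify_append (l.map (fun p => (key p, p.2)))
    (PySem.Dict.empty : PySem.Dict Int (List Int)) k
  refine h.trans ?_
  simp [List.filter_map, Function.comp_def]

-- ===== VERDICT (by name: the statement is the Claim_ definition above) =====
theorem bin_time_series_spec : Claim_equal_bin_time_series := by
  intro dates data binsize start_date _ _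
  unfold Spec_bin_time_series
  cases dates with
  | nil => rfl
  | cons d0 rest =>
    simp only [bin_time_series, bin_time_series_alt]
    rw [binDict_keys ((d0 :: rest).zip data)
        (fun p => (start_date.getD d0) + PySem.Int.floordiv |p.1 - (start_date.getD d0)| binsize * binsize)]
    refine congrArg _ ?_
    refine List.map_congr_left (fun k _ => ?_)
    exact binDict_getD ((d0 :: rest).zip data)
      (fun p => (start_date.getD d0) + PySem.Int.floordiv |p.1 - (start_date.getD d0)| binsize * binsize) k
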